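-- pv_equiv track=rewrite | github.com/ryanc3412/multiagent_final | condorcet.py | fullCondorcet
-- ===== SOURCE A (Python) =====
-- def buildPrecedenceTable(num_candidates, population):
--     precedes = [[0 for i in range(num_candidates)] for j in range(num_candidates)]
--     for subPopulation in population:
--         order = subPopulation[0]
--         for i in range(num_candidates-1):
--             for j in range(i+1, num_candidates):
--                 precedes[order[i]][order[j]] += subPopulation[1]
--     return precedes
--
-- def getCopelandScores(precedenceTable, num_candidates):
--     scores = [0 for i in range(num_candidates)]
--     for i in range(num_candidates):
--         for j in range(num_candidates):
--             if i==j: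
--                 continue
--             if precedenceTable[i][j] > precedenceTable[j][i]:
--                 scores[i] +=1
--             else:
--                 scores[i] -=1
--     return scores
--
-- def fullCondorcet(num_candidates, population):
--     precTable = buildPrecedenceTable(num_candidates, population)
--     copeScores = getCopelandScores(precTable, num_candidates)
--     winner=-1
--     loser=-1
--     for i in range(num_candidates):
--         # If a condorcet winner exists, its copeland score is equal to the number of candidates minus 1
--         if copeScores[i] == num_candidates - 1:
--             winner = i
--         # If a condorcet loser exists, its copeland score is -(number of candidates -1), or 1 minus the number of candidates
--         elif copeScores[i] == 1 - num_candidates: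
--             loser = i
--     maxScore = max(copeScores)
--     return winner, loser, [x - maxScore for x in copeScores]
-- ===== SOURCE B (Python) =====
-- def fullCondorcet(num_candidates, population):
--     def net(a, b):
--         total = 0
--         for order, weight in population:
--             if order.index(a) < order.index(b):
--                 total += weight
--             else:
--                 total -= weight
--         return total
--     scores = [sum(1 if net(i, j) > 0 else -1
--                   for j in range(num_candidates) if j != i)
--               for i in range(num_candidates)]
--     winner = -1
--     loser = -1
--     for i in range(num_candidates):
--         if scores[i] == num_candidates - 1:
--             winner = i
--         elif scores[i] == 1 - num_candidates:
--             loser = i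
--     maxScore = max(scores)
--     return winner, loser, [x - maxScore for x in scores]
-- ===== Notes on version B (the rewrite author's own statement) =====
-- stated objective: simpler
-- what changed: B drops the full precedence table and the table-driven Copeland pass: it computes each candidate's score directly from per-pair weighted net preference obtained by comparing ballot positions (order.index), building the score list by comprehension instead of two stages of in-place matrix/list mutation.
-- outside the precondition, e.g. on fullCondorcet(2, [([-1, 0], 1)]): A returns (1, 0, [-2, 0]), B raises ValueError; on fullCondorcet(2, [([0, 0], 1)]): A returns (-1, 1, [0, 0]), B raises ValueError
import Mathlib
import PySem

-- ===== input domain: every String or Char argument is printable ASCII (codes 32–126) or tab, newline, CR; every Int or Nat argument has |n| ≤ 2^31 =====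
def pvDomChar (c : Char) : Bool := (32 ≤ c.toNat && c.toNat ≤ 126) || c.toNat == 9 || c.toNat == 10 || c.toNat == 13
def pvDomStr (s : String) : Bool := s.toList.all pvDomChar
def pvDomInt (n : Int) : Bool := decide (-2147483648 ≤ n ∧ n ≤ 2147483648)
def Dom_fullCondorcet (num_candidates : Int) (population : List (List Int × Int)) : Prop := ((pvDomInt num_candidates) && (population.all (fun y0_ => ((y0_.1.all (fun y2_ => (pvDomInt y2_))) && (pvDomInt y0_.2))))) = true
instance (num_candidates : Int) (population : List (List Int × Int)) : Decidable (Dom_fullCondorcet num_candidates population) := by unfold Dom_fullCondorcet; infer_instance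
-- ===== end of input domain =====

-- B replaces A's precedence table + table-driven Copeland pass by direct per-pair weighted
-- position comparison of the ballots (same results on ballots that rank every candidate once).


-- ===== PORT A =====
-- precedes[x][y] += v  (indices are in range under Pre_, where this is exact)
def upd2 (tbl : List (List Int)) (x y v : Int) : List (List Int) :=
  PySem.List.pySetD tbl x
    (PySem.List.pySetD (PySem.List.pyGetD tbl x []) y
      (PySem.List.pyGetD (PySem.List.pyGetD tbl x []) y 0 + v))

def buildPrecedenceTable (num_candidates : Int) (population : List (List Int × Int)) : List (List Int) :=
  population.foldl (fun precedes subPopulation =>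
    let order := subPopulation.1
    (PySem.List.pyRange 0 (num_candidates - 1) 1).foldl (fun precedes i =>
      (PySem.List.pyRange (i + 1) num_candidates 1).foldl (fun precedes j =>
        upd2 precedes (PySem.List.pyGetD order i 0) (PySem.List.pyGetD order j 0)
          subPopulation.2) precedes) precedes)
    ((PySem.List.pyRange 0 num_candidates 1).map
      (fun _ => (PySem.List.pyRange 0 num_candidates 1).map (fun _ => (0 : Int))))

def getCopelandScores (precedenceTable : List (List Int)) (num_candidates : Int) : List Int :=
  (PySem.List.pyRange 0 num_candidates 1).foldl (fun scores i =>
    (PySem.List.pyRange 0 num_candidates 1).foldl (fun scores j =>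
      if i = j then scores
      else if PySem.List.pyGetD (PySem.List.pyGetD precedenceTable i []) j 0 >
              PySem.List.pyGetD (PySem.List.pyGetD precedenceTable j []) i 0 then
        PySem.List.pySetD scores i (PySem.List.pyGetD scores i 0 + 1)
      else
        PySem.List.pySetD scores i (PySem.List.pyGetD scores i 0 - 1)) scores)
    ((PySem.List.pyRange 0 num_candidates 1).map (fun _ => (0 : Int)))

def fullCondorcet (num_candidates : Int) (population : List (List Int × Int)) : Int × Int × List Int :=
  let precTable := buildPrecedenceTable num_candidates population
  let copeScores := getCopelandScores precTable num_candidates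
  let wl := (PySem.List.pyRange 0 num_candidates 1).foldl (fun (wl : Int × Int) i =>
      if PySem.List.pyGetD copeScores i 0 = num_candidates - 1 then (i, wl.2)
      else if PySem.List.pyGetD copeScores i 0 = 1 - num_candidates then (wl.1, i)
      else wl) (-1, -1)
  -- max(copeScores): Python raises ValueError on the empty list; Pre_ gives num_candidates ≥ 1
  let maxScore := (PySem.List.max? copeScores (fun x => x)).getD 0
  (wl.1, wl.2, copeScores.map (fun x => x - maxScore))

-- ===== PORT B =====
-- order.index(v): Python raises ValueError when absent; Pre_ guarantees presence
def idxB (order : List Int) (v : Int) : Nat := (PySem.List.index? order v).getD 0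

def netB (population : List (List Int × Int)) (a b : Int) : Int :=
  population.foldl (fun total p =>
    if idxB p.1 a < idxB p.1 b then total + p.2 else total - p.2) 0

def fullCondorcet_alt (num_candidates : Int) (population : List (List Int × Int)) : Int × Int × List Int :=
  let scores := (PySem.List.pyRange 0 num_candidates 1).map (fun i =>
    (((PySem.List.pyRange 0 num_candidates 1).filter (fun j => j != i)).map
      (fun j => if netB population i j > 0 then (1 : Int) else -1)).sum)
  let wl := (PySem.List.pyRange 0 num_candidates 1).foldl (fun (wl : Int × Int) i =>
      if PySem.List.pyGetD scores i 0 = num_candidates - 1 then (i, wl.2)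
      else if PySem.List.pyGetD scores i 0 = 1 - num_candidates then (wl.1, i)
      else wl) (-1, -1)
  let maxScore := (PySem.List.max? scores (fun x => x)).getD 0
  (wl.1, wl.2, scores.map (fun x => x - maxScore))

-- ===== PRECONDITION & SPEC =====
-- Pre_ restricts to the task's natural domain: at least one candidate (A raises ValueError from
-- max([]) when num_candidates ≤ 0) and, when there are two or more candidates, each ballot's
-- first num_candidates entries a permutation of 0..num_candidates-1 (with one candidate neither
-- program reads a ballot); outside that A either raises IndexError or returns accidental values
-- from double counting / negative-index wraparound, while B raises ValueError.
def Pre_fullCondorcet (num_candidates : Int) (population : List (List Int × Int)) : Prop :=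
  1 ≤ num_candidates ∧
  (num_candidates = 1 ∨ ∀ p ∈ population,
    num_candidates ≤ (p.1.length : Int) ∧ (p.1.take num_candidates.toNat).Nodup ∧
    ∀ x ∈ p.1.take num_candidates.toNat, 0 ≤ x ∧ x < num_candidates)
instance (num_candidates : Int) (population : List (List Int × Int)) : Decidable (Pre_fullCondorcet num_candidates population) := by unfold Pre_fullCondorcet; infer_instance

def pvWitness_fullCondorcet : Int × (List (List Int × Int)) := (2, [([0, 1], 1), ([1, 0], 3)])

def Spec_fullCondorcet (num_candidates : Int) (population : List (List Int × Int)) (out : Int × Int × List Int) : Prop := out = fullCondorcet_alt num_candidates population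
instance (num_candidates : Int) (population : List (List Int × Int)) (out : Int × Int × List Int) : Decidable (Spec_fullCondorcet num_candidates population out) := by unfold Spec_fullCondorcet; infer_instance

-- ===== CLAIM (what is proved, stated in full; the proofs are below) =====
def Claim_equal_fullCondorcet : Prop := ∀ (num_candidates : Int) (population : List (List Int × Int)), Dom_fullCondorcet num_candidates population → Pre_fullCondorcet num_candidates population → Spec_fullCondorcet num_candidates population (fullCondorcet num_candidates population)

-- ===== LEMMAS AND PROOFS =====

-- proof-layer abstractions
def read2 (T : List (List Int)) (a b : Int) : Int :=
  PySem.List.pyGetD (PySem.List.pyGetD T a []) b 0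

def Wsum (pop : List (List Int × Int)) (a b : Int) : Int :=
  (pop.map (fun p => if idxB p.1 a < idxB p.1 b then p.2 else 0)).sum

def Sfun (c : Int) (pop : List (List Int × Int)) (i : Int) : Int :=
  (((PySem.List.pyRange 0 c 1).filter (fun j => j != i)).map
    (fun j => if Wsum pop i j > Wsum pop j i then (1 : Int) else -1)).sum

def Shape (c : Int) (T : List (List Int)) : Prop :=
  T.length = c.toNat ∧ ∀ r ∈ T, r.length = c.toNat

-- generic sum lemmas
lemma sum_map_single {M : Type} [AddCommMonoid M] (l : List Int) (v : Int) (t : M)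
    (hnd : l.Nodup) :
    (l.map (fun i => if i = v then t else 0)).sum = if v ∈ l then t else 0 := by
  induction l with
  | nil => simp
  | cons x xs ih =>
    rcases List.nodup_cons.mp hnd with ⟨hx, hxs⟩
    by_cases hxv : x = v
    · subst hxv
      have h0 : (xs.map (fun i => if i = x then t else 0)).sum = 0 := by
        rw [ih hxs, if_neg hx]
      simp [h0]
    · simp only [List.map_cons, List.sum_cons, if_neg hxv, ih hxs, List.mem_cons]
      have hmem : (v = x ∨ v ∈ xs) ↔ v ∈ xs := or_iff_right (fun h => hxv h.symm)
      rw [if_congr hmem rfl rfl, zero_add]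

lemma sum_map_ite_filter {β : Type} (l : List β) (p : β → Bool) (f : β → Int) :
    (l.map (fun x => if p x then f x else 0)).sum = ((l.filter p).map f).sum := by
  induction l with
  | nil => simp
  | cons x xs ih =>
    by_cases hp : p x
    · simp [hp, ih]
    · simp [hp, ih]

lemma sum_map_sub {β : Type} (l : List β) (f g : β → Int) :
    (l.map (fun x => f x - g x)).sum = (l.map f).sum - (l.map g).sum := by
  induction l with
  | nil => simp
  | cons x xs ih => simp [ih]; ring

-- first-occurrence facts (idxB o v = Python order.index(v), total form)
lemma pos_spec (o : List Int) (v : Int) (hv : v ∈ o) :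
    ∃ h : idxB o v < o.length, o[idxB o v] = v ∧ ∀ j (hj : j < idxB o v), o[j] ≠ v := by
  obtain ⟨k, hk⟩ := Option.isSome_iff_exists.mp ((PySem.List.index?_isSome_iff o v).mpr hv)
  obtain ⟨hlt, hget, hmin⟩ := PySem.List.getElem_of_index?_eq_some hk
  have hB : idxB o v = k := by unfold idxB; rw [hk]; rfl
  simp only [hB]; exact ⟨hlt, hget, hmin⟩

lemma perm_take_len {c : Int} {o : List Int}
    (h : (o.take c.toNat).Perm (PySem.List.pyRange 0 c 1)) : c.toNat ≤ o.length := by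
  have h1 := h.length_eq
  rw [PySem.List.length_pyRange_one] at h1
  simp only [List.length_take] at h1
  omega

lemma perm_mem {c : Int} {o : List Int}
    (h : (o.take c.toNat).Perm (PySem.List.pyRange 0 c 1)) {v : Int}
    (hv0 : 0 ≤ v) (hv1 : v < c) : v ∈ o.take c.toNat := by
  rw [h.mem_iff, PySem.List.mem_pyRange_one]; exact ⟨hv0, hv1⟩

lemma perm_pos_lt {c : Int} {o : List Int}
    (h : (o.take c.toNat).Perm (PySem.List.pyRange 0 c 1)) {v : Int}
    (hv0 : 0 ≤ v) (hv1 : v < c) : idxB o v < c.toNat := by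
  have hmem := perm_mem h hv0 hv1
  have hvo : v ∈ o := List.mem_of_mem_take hmem
  obtain ⟨hlt, hget, hmin⟩ := pos_spec o v hvo
  obtain ⟨k', hk', hk'eq⟩ := List.getElem_of_mem hmem
  have hk'len : k' < c.toNat := by
    have := List.length_take (i := c.toNat) (l := o)
    omega
  rw [List.getElem_take] at hk'eq
  by_contra hge
  exact (hmin k' (by omega)) hk'eq

lemma perm_getElem_pos {c : Int} {o : List Int}
    (h : (o.take c.toNat).Perm (PySem.List.pyRange 0 c 1)) {v : Int}
    (hv0 : 0 ≤ v) (hv1 : v < c) :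
    ∃ hlt : idxB o v < o.length, o[idxB o v] = v :=
  (pos_spec o v (List.mem_of_mem_take (perm_mem h hv0 hv1))).imp (fun _ hp => hp.1)

lemma perm_get_eq_iff {c : Int} {o : List Int}
    (h : (o.take c.toNat).Perm (PySem.List.pyRange 0 c 1)) {v : Int}
    (hv0 : 0 ≤ v) (hv1 : v < c) {i : Int} (hi0 : 0 ≤ i) (hi1 : i < c) :
    PySem.List.pyGetD o i 0 = v ↔ i = (idxB o v : Int) := by
  have hlen := perm_take_len h
  have hnd : (o.take c.toNat).Nodup := h.nodup_iff.mpr (PySem.List.nodup_pyRange_one 0 c)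
  have hgd : PySem.List.pyGetD o i 0 = o[i.toNat]'(by omega) :=
    PySem.List.pyGetD_eq_getElem o 0 hi0 (by omega)
  have hpv := perm_pos_lt h hv0 hv1
  obtain ⟨hplt, hpget⟩ := perm_getElem_pos h hv0 hv1
  constructor
  · intro hev
    have h1 : (o.take c.toNat)[i.toNat]'(by simp [List.length_take]; omega) = v := by
      rw [List.getElem_take]; rw [hgd] at hev; exact hev
    have h2 : (o.take c.toNat)[idxB o v]'(by simp [List.length_take]; omega) = v := by
      rw [List.getElem_take]; exact hpget
    have h12 : (o.take c.toNat)[i.toNat]'(by simp [List.length_take]; omega)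
        = (o.take c.toNat)[idxB o v]'(by simp [List.length_take]; omega) := by rw [h1, h2]
    have := (hnd.getElem_inj_iff).mp h12
    omega
  · intro hiv
    rw [hgd]
    have : i.toNat = idxB o v := by omega
    simp only [this]; exact hpget

lemma perm_pos_ne {c : Int} {o : List Int}
    (h : (o.take c.toNat).Perm (PySem.List.pyRange 0 c 1)) {a b : Int}
    (ha0 : 0 ≤ a) (ha1 : a < c) (hb0 : 0 ≤ b) (hb1 : b < c) (hab : a ≠ b) :
    idxB o a ≠ idxB o b := by
  obtain ⟨hla, hga⟩ := perm_getElem_pos h ha0 ha1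
  obtain ⟨hlb, hgb⟩ := perm_getElem_pos h hb0 hb1
  intro he
  apply hab
  rw [← hga, ← hgb]
  congr 1

-- 1-D array read/write
lemma get1_set1 (s : List Int) (i a v : Int) (hi0 : 0 ≤ i) (_hi1 : i < (s.length : Int))
    (ha0 : 0 ≤ a) (ha1 : a < (s.length : Int)) :
    PySem.List.pyGetD (PySem.List.pySetD s i v) a 0
      = if a = i then v else PySem.List.pyGetD s a 0 := by
  rw [PySem.List.pySetD_of_nonneg s v hi0]
  rw [PySem.List.pyGetD_eq_getElem _ 0 ha0 (by simp; omega)]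
  rw [List.getElem_set]
  by_cases hai : a = i
  · rw [if_pos hai, if_pos (by omega)]
  · rw [if_neg hai, if_neg (by omega), PySem.List.pyGetD_eq_getElem _ 0 ha0 (by omega)]

lemma length_set1 (s : List Int) (i v : Int) :
    (PySem.List.pySetD s i v).length = s.length := PySem.List.length_pySetD s i v

-- generic pointwise-update fold over a list of indices
lemma foldl_point (step : List Int → Int → List Int) (F : Int → Int) (n : Nat) :
    ∀ (l : List Int) (s : List Int), s.length = n →
    (∀ s' i, s'.length = n → i ∈ l → (step s' i).length = n) →
    (∀ s' i, s'.length = n → i ∈ l → ∀ a, 0 ≤ a → a < (n : Int) →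
      PySem.List.pyGetD (step s' i) a 0
        = if a = i then PySem.List.pyGetD s' a 0 + F i else PySem.List.pyGetD s' a 0) →
    (l.foldl step s).length = n ∧ ∀ a, 0 ≤ a → a < (n : Int) →
      PySem.List.pyGetD (l.foldl step s) a 0
        = PySem.List.pyGetD s a 0 + (l.map (fun i => if i = a then F i else 0)).sum := by
  intro l
  induction l with
  | nil => intro s hs _ _; exact ⟨hs, by simp⟩
  | cons x xs ih =>
    intro s hs hlen hread
    have hx : x ∈ x :: xs := List.mem_cons_self
    have hs' : (step s x).length = n := hlen s x hs hx
    obtain ⟨ihl, ihr⟩ := ih (step s x) hs'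
      (fun s' i h hi => hlen s' i h (List.mem_cons_of_mem _ hi))
      (fun s' i h hi => hread s' i h (List.mem_cons_of_mem _ hi))
    refine ⟨by simpa using ihl, ?_⟩
    intro a ha0 ha1
    rw [List.foldl_cons, ihr a ha0 ha1, hread s x hs hx a ha0 ha1]
    simp only [List.map_cons, List.sum_cons]
    by_cases hax : a = x
    · rw [if_pos hax, if_pos hax.symm]; ring
    · rw [if_neg hax, if_neg (fun h => hax h.symm)]; ring

-- 2-D table read/write
lemma shape_upd2 {c : Int} {T : List (List Int)} (hT : Shape c T) {x : Int} (y v : Int)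
    (hx0 : 0 ≤ x) (hx1 : x < c) : Shape c (upd2 T x y v) := by
  obtain ⟨hl, hr⟩ := hT
  unfold upd2
  constructor
  · rw [PySem.List.length_pySetD]; exact hl
  · intro r hrm
    rw [PySem.List.pySetD_of_nonneg _ _ hx0] at hrm
    rcases List.mem_or_eq_of_mem_set hrm with hmem | heq
    · exact hr r hmem
    · subst heq
      rw [PySem.List.length_pySetD]
      apply hr
      rw [PySem.List.pyGetD_eq_getElem _ [] hx0 (by omega)]
      exact List.getElem_mem _

lemma getrow_set (T : List (List Int)) (x a : Int) (row : List Int)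
    (hx0 : 0 ≤ x) (_hx1 : x < (T.length : Int)) (ha0 : 0 ≤ a) (ha1 : a < (T.length : Int)) :
    PySem.List.pyGetD (PySem.List.pySetD T x row) a []
      = if a = x then row else PySem.List.pyGetD T a [] := by
  rw [PySem.List.pySetD_of_nonneg T row hx0]
  rw [PySem.List.pyGetD_eq_getElem _ [] ha0 (by simp; omega)]
  rw [List.getElem_set]
  by_cases hax : a = x
  · rw [if_pos hax, if_pos (by omega)]
  · rw [if_neg hax, if_neg (by omega), PySem.List.pyGetD_eq_getElem _ [] ha0 (by omega)]

lemma read2_upd2 {c : Int} {T : List (List Int)} (hT : Shape c T) {x y a b : Int} (v : Int)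
    (hx0 : 0 ≤ x) (hx1 : x < c) (hy0 : 0 ≤ y) (hy1 : y < c)
    (ha0 : 0 ≤ a) (ha1 : a < c) (hb0 : 0 ≤ b) (hb1 : b < c) :
    read2 (upd2 T x y v) a b = if a = x ∧ b = y then read2 T a b + v else read2 T a b := by
  obtain ⟨hl, hr⟩ := hT
  have hrowx : PySem.List.pyGetD T x [] = T[x.toNat]'(by omega) :=
    PySem.List.pyGetD_eq_getElem T [] hx0 (by omega)
  have hrowlen : (PySem.List.pyGetD T x []).length = c.toNat := by
    rw [hrowx]; exact hr _ (List.getElem_mem _)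
  unfold read2 upd2
  rw [getrow_set T x a _ hx0 (by omega) ha0 (by omega)]
  by_cases hax : a = x
  · rw [if_pos hax]
    rw [get1_set1 _ y b _ hy0 (by rw [hrowlen]; omega) hb0 (by rw [hrowlen]; omega)]
    by_cases hby : b = y
    · rw [if_pos hby, if_pos ⟨hax, hby⟩, hax, hby]
    · rw [if_neg hby, if_neg (by tauto), hax]
  · rw [if_neg hax, if_neg (by tauto)]

lemma foldl_upd2 {c : Int} (w : Int) {γ : Type} (k1 k2 : γ → Int) :
    ∀ (L : List γ) (T : List (List Int)), Shape c T →
    (∀ q ∈ L, (0 ≤ k1 q ∧ k1 q < c) ∧ (0 ≤ k2 q ∧ k2 q < c)) →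
    Shape c (L.foldl (fun T q => upd2 T (k1 q) (k2 q) w) T) ∧
    ∀ a b, 0 ≤ a → a < c → 0 ≤ b → b < c →
      read2 (L.foldl (fun T q => upd2 T (k1 q) (k2 q) w) T) a b
        = read2 T a b + w * (L.countP (fun q => decide (k1 q = a ∧ k2 q = b)) : Int) := by
  intro L
  induction L with
  | nil => intro T hT _; exact ⟨hT, by simp⟩
  | cons q L ih =>
    intro T hT hk
    obtain ⟨⟨h10, h11⟩, ⟨h20, h21⟩⟩ := hk q List.mem_cons_self
    have hT' : Shape c (upd2 T (k1 q) (k2 q) w) := shape_upd2 hT (k2 q) w h10 h11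
    obtain ⟨ihS, ihR⟩ := ih (upd2 T (k1 q) (k2 q) w) hT'
      (fun p hp => hk p (List.mem_cons_of_mem _ hp))
    refine ⟨by simpa using ihS, ?_⟩
    intro a b ha0 ha1 hb0 hb1
    rw [List.foldl_cons, ihR a b ha0 ha1 hb0 hb1,
      read2_upd2 hT w h10 h11 h20 h21 ha0 ha1 hb0 hb1, List.countP_cons]
    by_cases hqa : k1 q = a ∧ k2 q = b
    · rw [if_pos ⟨hqa.1.symm, hqa.2.symm⟩ , if_pos (by simpa using hqa)]
      push_cast; ring
    · rw [if_neg (fun h => hqa ⟨h.1.symm, h.2.symm⟩), if_neg (by simpa using hqa)]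
      push_cast; ring

-- the per-ballot pair count: positions (i, j) with i < j hitting cell (a, b)
lemma pair_count {c : Int} {o : List Int}
    (h : (o.take c.toNat).Perm (PySem.List.pyRange 0 c 1))
    {a b : Int} (ha0 : 0 ≤ a) (ha1 : a < c) (hb0 : 0 ≤ b) (hb1 : b < c) (_hab : a ≠ b) :
    ((PySem.List.pyRange 0 (c-1) 1).flatMap
        (fun i => (PySem.List.pyRange (i+1) c 1).map (fun j => (i, j)))).countP
      (fun q => decide (PySem.List.pyGetD o q.1 0 = a ∧ PySem.List.pyGetD o q.2 0 = b))
    = if idxB o a < idxB o b then 1 else 0 := by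
  have hpa : idxB o a < c.toNat := perm_pos_lt h ha0 ha1
  have hpb : idxB o b < c.toNat := perm_pos_lt h hb0 hb1
  rw [List.countP_flatMap]
  have hinner : ∀ i ∈ PySem.List.pyRange 0 (c-1) 1,
      ((List.countP (fun q => decide (PySem.List.pyGetD o q.1 0 = a ∧ PySem.List.pyGetD o q.2 0 = b))) ∘
        (fun i => (PySem.List.pyRange (i+1) c 1).map (fun j => (i, j)))) i
      = if i = (idxB o a : Int) then (if idxB o a < idxB o b then 1 else 0) else 0 := by
    intro i hi
    rw [PySem.List.mem_pyRange_one] at hi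
    simp only [Function.comp, List.countP_map]
    by_cases hia : PySem.List.pyGetD o i 0 = a
    · have hieq : i = (idxB o a : Int) :=
        (perm_get_eq_iff h ha0 ha1 hi.1 (by omega)).mp hia
      rw [if_pos hieq]
      have hstep : List.countP
          ((fun q => decide (PySem.List.pyGetD o q.1 0 = a ∧ PySem.List.pyGetD o q.2 0 = b)) ∘
            fun j => (i, j)) (PySem.List.pyRange (i+1) c 1)
          = List.countP (fun j => j == (idxB o b : Int)) (PySem.List.pyRange (i+1) c 1) := by
        apply List.countP_congr
        intro j hj
        rw [PySem.List.mem_pyRange_one] at hj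
        simp only [Function.comp, decide_eq_true_eq, beq_iff_eq]
        constructor
        · intro hx
          exact (perm_get_eq_iff h hb0 hb1 (by omega) hj.2).mp hx.2
        · intro hx
          exact ⟨hia, (perm_get_eq_iff h hb0 hb1 (by omega) hj.2).mpr hx⟩
      rw [hstep]
      have hcount : List.countP (fun j => j == (idxB o b : Int)) (PySem.List.pyRange (i+1) c 1)
          = List.count (idxB o b : Int) (PySem.List.pyRange (i+1) c 1) := rfl
      rw [hcount]
      by_cases hord : idxB o a < idxB o b
      · rw [if_pos hord]
        apply List.count_eq_one_of_mem (PySem.List.nodup_pyRange_one _ _)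
        rw [PySem.List.mem_pyRange_one]
        omega
      · rw [if_neg hord]
        apply List.count_eq_zero_of_not_mem
        rw [PySem.List.mem_pyRange_one]
        omega
    · have hine : ¬ (i = (idxB o a : Int)) := by
        intro hieq
        exact hia ((perm_get_eq_iff h ha0 ha1 hi.1 (by omega)).mpr hieq)
      rw [if_neg hine]
      rw [List.countP_eq_zero]
      intro j hj
      simp only [Function.comp, decide_eq_true_eq, not_and]
      intro hx; exact absurd hx hia
  rw [List.map_congr_left hinner]
  rw [sum_map_single _ _ _ (PySem.List.nodup_pyRange_one 0 (c-1))]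
  by_cases hord : idxB o a < idxB o b
  · rw [if_pos hord]
    rw [if_pos (by rw [PySem.List.mem_pyRange_one]; omega)]
  · rw [if_neg hord]
    simp only [ite_self]

lemma perm_get_bound {c : Int} {o : List Int}
    (h : (o.take c.toNat).Perm (PySem.List.pyRange 0 c 1)) {i : Int}
    (hi0 : 0 ≤ i) (hi1 : i < c) :
    0 ≤ PySem.List.pyGetD o i 0 ∧ PySem.List.pyGetD o i 0 < c := by
  have hlen := perm_take_len h
  have hgd : PySem.List.pyGetD o i 0 = o[i.toNat]'(by omega) :=
    PySem.List.pyGetD_eq_getElem o 0 hi0 (by omega)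
  have hmem : o[i.toNat]'(by omega) ∈ o.take c.toNat := by
    have := List.getElem_take (xs := o) (j := c.toNat) (i := i.toNat)
      (h := by simp [List.length_take]; omega)
    rw [← this]
    exact List.getElem_mem _
  rw [h.mem_iff, PySem.List.mem_pyRange_one] at hmem
  rw [hgd]
  exact hmem

lemma shape_init {c : Int} :
    Shape c ((PySem.List.pyRange 0 c 1).map
      (fun _ => (PySem.List.pyRange 0 c 1).map (fun _ => (0 : Int)))) := by
  constructor
  · simp [PySem.List.length_pyRange_one]
  · intro r hr
    rw [List.mem_map] at hr
    obtain ⟨_, _, rfl⟩ := hr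
    simp [PySem.List.length_pyRange_one]

lemma read2_init {c : Int} {a b : Int} (ha0 : 0 ≤ a) (ha1 : a < c) (hb0 : 0 ≤ b) (hb1 : b < c) :
    read2 ((PySem.List.pyRange 0 c 1).map
      (fun _ => (PySem.List.pyRange 0 c 1).map (fun _ => (0 : Int)))) a b = 0 := by
  unfold read2
  rw [PySem.List.pyGetD_map_pyRange_of_nonneg _ c a [] ha0 ha1]
  rw [PySem.List.pyGetD_map_pyRange_of_nonneg _ c b 0 hb0 hb1]

-- one ballot's nested position loops, flattened and characterised
lemma voter_read {c : Int} {T : List (List Int)} (hT : Shape c T) {o : List Int} (w : Int)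
    (h : (o.take c.toNat).Perm (PySem.List.pyRange 0 c 1)) :
    Shape c ((PySem.List.pyRange 0 (c-1) 1).foldl (fun prec i =>
        (PySem.List.pyRange (i+1) c 1).foldl (fun prec j =>
          upd2 prec (PySem.List.pyGetD o i 0) (PySem.List.pyGetD o j 0) w) prec) T) ∧
    ∀ a b, 0 ≤ a → a < c → 0 ≤ b → b < c → a ≠ b →
      read2 ((PySem.List.pyRange 0 (c-1) 1).foldl (fun prec i =>
        (PySem.List.pyRange (i+1) c 1).foldl (fun prec j =>
          upd2 prec (PySem.List.pyGetD o i 0) (PySem.List.pyGetD o j 0) w) prec) T) a b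
      = read2 T a b + (if idxB o a < idxB o b then w else 0) := by
  have hflat : ∀ (T' : List (List Int)),
      (PySem.List.pyRange 0 (c-1) 1).foldl (fun prec i =>
        (PySem.List.pyRange (i+1) c 1).foldl (fun prec j =>
          upd2 prec (PySem.List.pyGetD o i 0) (PySem.List.pyGetD o j 0) w) prec) T'
      = ((PySem.List.pyRange 0 (c-1) 1).flatMap
          (fun i => (PySem.List.pyRange (i+1) c 1).map (fun j => (i, j)))).foldl
          (fun prec q => upd2 prec (PySem.List.pyGetD o q.1 0) (PySem.List.pyGetD o q.2 0) w) T' := by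
    intro T'
    rw [List.foldl_flatMap]
    simp only [List.foldl_map]
  have hbounds : ∀ q ∈ (PySem.List.pyRange 0 (c-1) 1).flatMap
      (fun i => (PySem.List.pyRange (i+1) c 1).map (fun j => (i, j))),
      (0 ≤ PySem.List.pyGetD o q.1 0 ∧ PySem.List.pyGetD o q.1 0 < c) ∧
      (0 ≤ PySem.List.pyGetD o q.2 0 ∧ PySem.List.pyGetD o q.2 0 < c) := by
    intro q hq
    rw [List.mem_flatMap] at hq
    obtain ⟨i, hi, hq⟩ := hq
    rw [List.mem_map] at hq
    obtain ⟨j, hj, rfl⟩ := hq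
    rw [PySem.List.mem_pyRange_one] at hi hj
    exact ⟨perm_get_bound h (by omega) (by omega), perm_get_bound h (by omega) (by omega)⟩
  obtain ⟨hS, hR⟩ := foldl_upd2 w _ _ _ T hT hbounds
  constructor
  · rw [hflat]; exact hS
  · intro a b ha0 ha1 hb0 hb1 hab
    rw [hflat, hR a b ha0 ha1 hb0 hb1, pair_count h ha0 ha1 hb0 hb1 hab]
    by_cases hord : idxB o a < idxB o b
    · rw [if_pos hord, if_pos hord]; push_cast; ring
    · rw [if_neg hord, if_neg hord]; push_cast; ring

-- the whole precedence table build, characterised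
lemma build_read {c : Int} :
    ∀ (pop : List (List Int × Int)) (T : List (List Int)), Shape c T →
    (∀ p ∈ pop, (p.1.take c.toNat).Perm (PySem.List.pyRange 0 c 1)) →
    Shape c (pop.foldl (fun precedes subPopulation =>
        let order := subPopulation.1
        (PySem.List.pyRange 0 (c-1) 1).foldl (fun precedes i =>
          (PySem.List.pyRange (i+1) c 1).foldl (fun precedes j =>
            upd2 precedes (PySem.List.pyGetD order i 0) (PySem.List.pyGetD order j 0)
              subPopulation.2) precedes) precedes) T) ∧
    ∀ a b, 0 ≤ a → a < c → 0 ≤ b → b < c → a ≠ b →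
      read2 (pop.foldl (fun precedes subPopulation =>
        let order := subPopulation.1
        (PySem.List.pyRange 0 (c-1) 1).foldl (fun precedes i =>
          (PySem.List.pyRange (i+1) c 1).foldl (fun precedes j =>
            upd2 precedes (PySem.List.pyGetD order i 0) (PySem.List.pyGetD order j 0)
              subPopulation.2) precedes) precedes) T) a b
      = read2 T a b + Wsum pop a b := by
  intro pop
  induction pop with
  | nil => intro T hT _; exact ⟨hT, by intro a b _ _ _ _ _; simp [Wsum]⟩
  | cons p pop ih =>
    intro T hT hpop
    have hp := hpop p List.mem_cons_self
    obtain ⟨hvS, hvR⟩ := voter_read hT p.2 hp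
    obtain ⟨ihS, ihR⟩ := ih _ hvS (fun q hq => hpop q (List.mem_cons_of_mem _ hq))
    refine ⟨by simpa using ihS, ?_⟩
    intro a b ha0 ha1 hb0 hb1 hab
    rw [List.foldl_cons]
    rw [ihR a b ha0 ha1 hb0 hb1 hab]
    rw [hvR a b ha0 ha1 hb0 hb1 hab]
    simp only [Wsum, List.map_cons, List.sum_cons]
    ring

lemma table_read {c : Int} {pop : List (List Int × Int)}
    (hpop : ∀ p ∈ pop, (p.1.take c.toNat).Perm (PySem.List.pyRange 0 c 1)) :
    Shape c (buildPrecedenceTable c pop) ∧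
    ∀ a b, 0 ≤ a → a < c → 0 ≤ b → b < c → a ≠ b →
      read2 (buildPrecedenceTable c pop) a b = Wsum pop a b := by
  obtain ⟨hS, hR⟩ := build_read pop _ (shape_init (c := c)) hpop
  refine ⟨hS, ?_⟩
  intro a b ha0 ha1 hb0 hb1 hab
  rw [buildPrecedenceTable]
  rw [hR a b ha0 ha1 hb0 hb1 hab, read2_init ha0 ha1 hb0 hb1, zero_add]

def deltaT (c : Int) (T : List (List Int)) (i : Int) : Int :=
  ((PySem.List.pyRange 0 c 1).map (fun j => if i = j then 0
    else if read2 T i j > read2 T j i then (1 : Int) else -1)).sum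

-- the inner Copeland loop only touches entry i, adding the signed comparison sum
lemma cope_inner (T : List (List Int)) (i : Int) :
    ∀ (l : List Int) (s : List Int), 0 ≤ i → i < (s.length : Int) →
    ((l.foldl (fun scores j =>
        if i = j then scores
        else if PySem.List.pyGetD (PySem.List.pyGetD T i []) j 0 >
            PySem.List.pyGetD (PySem.List.pyGetD T j []) i 0 then
          PySem.List.pySetD scores i (PySem.List.pyGetD scores i 0 + 1)
        else
          PySem.List.pySetD scores i (PySem.List.pyGetD scores i 0 - 1)) s).length = s.length) ∧
    (∀ a, 0 ≤ a → a < (s.length : Int) →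
      PySem.List.pyGetD (l.foldl (fun scores j =>
        if i = j then scores
        else if PySem.List.pyGetD (PySem.List.pyGetD T i []) j 0 >
            PySem.List.pyGetD (PySem.List.pyGetD T j []) i 0 then
          PySem.List.pySetD scores i (PySem.List.pyGetD scores i 0 + 1)
        else
          PySem.List.pySetD scores i (PySem.List.pyGetD scores i 0 - 1)) s) a 0
      = if a = i then PySem.List.pyGetD s a 0 + (l.map (fun j => if i = j then 0
          else if read2 T i j > read2 T j i then (1 : Int) else -1)).sum
        else PySem.List.pyGetD s a 0) := by
  intro l
  induction l with
  | nil =>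
    intro s _ _
    refine ⟨rfl, ?_⟩
    intro a _ _
    by_cases hai : a = i <;> simp [hai]
  | cons j l ih =>
    intro s hi0 hi1
    simp only [read2] at ih ⊢
    by_cases hij : i = j
    · obtain ⟨ihl, ihr⟩ := ih s hi0 hi1
      refine ⟨by rw [List.foldl_cons, if_pos hij]; exact ihl, ?_⟩
      intro a ha0 ha1
      rw [List.foldl_cons, if_pos hij, ihr a ha0 ha1]
      simp only [List.map_cons, List.sum_cons, if_pos hij, zero_add]
    · by_cases hgt : PySem.List.pyGetD (PySem.List.pyGetD T i []) j 0 >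
          PySem.List.pyGetD (PySem.List.pyGetD T j []) i 0
      · have hlen' : (PySem.List.pySetD s i (PySem.List.pyGetD s i 0 + 1)).length = s.length :=
          length_set1 s i _
        obtain ⟨ihl, ihr⟩ := ih (PySem.List.pySetD s i (PySem.List.pyGetD s i 0 + 1)) hi0
          (by rw [hlen']; exact hi1)
        refine ⟨by rw [List.foldl_cons, if_neg hij, if_pos hgt]; rw [ihl, hlen'], ?_⟩
        intro a ha0 ha1
        rw [List.foldl_cons, if_neg hij, if_pos hgt,
          ihr a ha0 (by rw [hlen']; exact ha1)]
        rw [get1_set1 s i a _ hi0 hi1 ha0 ha1]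
        simp only [List.map_cons, List.sum_cons, if_neg hij, if_pos hgt]
        by_cases hai : a = i
        · rw [if_pos hai, if_pos hai, if_pos hai, hai]; ring
        · rw [if_neg hai, if_neg hai, if_neg hai]
      · have hlen' : (PySem.List.pySetD s i (PySem.List.pyGetD s i 0 - 1)).length = s.length :=
          length_set1 s i _
        obtain ⟨ihl, ihr⟩ := ih (PySem.List.pySetD s i (PySem.List.pyGetD s i 0 - 1)) hi0
          (by rw [hlen']; exact hi1)
        refine ⟨by rw [List.foldl_cons, if_neg hij, if_neg hgt]; rw [ihl, hlen'], ?_⟩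
        intro a ha0 ha1
        rw [List.foldl_cons, if_neg hij, if_neg hgt,
          ihr a ha0 (by rw [hlen']; exact ha1)]
        rw [get1_set1 s i a _ hi0 hi1 ha0 ha1]
        simp only [List.map_cons, List.sum_cons, if_neg hij, if_neg hgt]
        by_cases hai : a = i
        · rw [if_pos hai, if_pos hai, if_pos hai, hai]; ring
        · rw [if_neg hai, if_neg hai, if_neg hai]

lemma cope_eq {c : Int} (hc : 1 ≤ c) (T : List (List Int)) :
    getCopelandScores T c = (PySem.List.pyRange 0 c 1).map (deltaT c T) := by
  have hzlen : ((PySem.List.pyRange 0 c 1).map (fun _ => (0 : Int))).length = c.toNat := by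
    simp [PySem.List.length_pyRange_one]
  obtain ⟨hlenF, hreadF⟩ := foldl_point
    (fun scores i => (PySem.List.pyRange 0 c 1).foldl (fun scores j =>
        if i = j then scores
        else if PySem.List.pyGetD (PySem.List.pyGetD T i []) j 0 >
            PySem.List.pyGetD (PySem.List.pyGetD T j []) i 0 then
          PySem.List.pySetD scores i (PySem.List.pyGetD scores i 0 + 1)
        else
          PySem.List.pySetD scores i (PySem.List.pyGetD scores i 0 - 1)) scores)
    (deltaT c T) c.toNat (PySem.List.pyRange 0 c 1)
    ((PySem.List.pyRange 0 c 1).map (fun _ => (0 : Int))) hzlen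
    (fun s' i hs' hi => by
      obtain ⟨hl, _⟩ := cope_inner T i (PySem.List.pyRange 0 c 1) s'
        (by rw [PySem.List.mem_pyRange_one] at hi; omega)
        (by rw [PySem.List.mem_pyRange_one] at hi; rw [hs']; omega)
      rw [hl, hs'])
    (fun s' i hs' hi a ha0 ha1 => by
      obtain ⟨_, hr⟩ := cope_inner T i (PySem.List.pyRange 0 c 1) s'
        (by rw [PySem.List.mem_pyRange_one] at hi; omega)
        (by rw [PySem.List.mem_pyRange_one] at hi; rw [hs']; omega)
      rw [hr a ha0 (by rw [hs']; exact ha1)]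
      rfl)
  apply List.ext_getElem
  · rw [getCopelandScores, hlenF]
    simp [PySem.List.length_pyRange_one]
  · intro k h1 h2
    have hklt : k < c.toNat := by
      rw [getCopelandScores, hlenF] at h1; exact h1
    have hgd : PySem.List.pyGetD (getCopelandScores T c) (k : Int) 0
        = (getCopelandScores T c)[k]'h1 := by
      rw [PySem.List.pyGetD_eq_getElem _ 0 (by omega) (by rw [getCopelandScores, hlenF]; omega)]
      rfl
    rw [← hgd, getCopelandScores, hreadF (k : Int) (by omega) (by omega)]
    rw [PySem.List.pyGetD_map_pyRange_of_nonneg _ c (k : Int) 0 (by omega) (by omega)]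
    have hmc : ∀ i ∈ PySem.List.pyRange 0 c 1,
        (if i = (k : Int) then deltaT c T i else 0)
        = (if i = (k : Int) then deltaT c T (k : Int) else 0) := by
      intro i _
      by_cases hik : i = (k : Int)
      · rw [if_pos hik, if_pos hik, hik]
      · rw [if_neg hik, if_neg hik]
    rw [List.map_congr_left hmc,
      sum_map_single _ _ _ (PySem.List.nodup_pyRange_one 0 c), zero_add,
      if_pos (by rw [PySem.List.mem_pyRange_one]; omega)]
    rw [List.getElem_map, PySem.List.getElem_pyRange_one 0 c k
      (by rw [PySem.List.length_pyRange_one]; omega), zero_add]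

lemma netB_eq {c : Int} {pop : List (List Int × Int)}
    (hpop : ∀ p ∈ pop, (p.1.take c.toNat).Perm (PySem.List.pyRange 0 c 1))
    {i j : Int} (hi0 : 0 ≤ i) (hi1 : i < c) (hj0 : 0 ≤ j) (hj1 : j < c) (hij : i ≠ j) :
    netB pop i j = Wsum pop i j - Wsum pop j i := by
  unfold netB
  rw [PySem.List.foldl_congr_mem pop
    (fun total p => if idxB p.1 i < idxB p.1 j then total + p.2 else total - p.2)
    (fun total p => total + (if idxB p.1 i < idxB p.1 j then p.2 else -p.2)) 0
    (by intro acc p _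
        by_cases hcmp : idxB p.1 i < idxB p.1 j
        · simp only [if_pos hcmp]
        · simp only [if_neg hcmp]; ring)]
  rw [PySem.List.foldl_add, zero_add]
  have hpt : ∀ p ∈ pop,
      (if idxB p.1 i < idxB p.1 j then p.2 else -p.2)
      = (fun p => (if idxB p.1 i < idxB p.1 j then p.2 else 0)
          - (if idxB p.1 j < idxB p.1 i then p.2 else 0)) p := by
    intro p hp
    have hne := perm_pos_ne (hpop p hp) hi0 hi1 hj0 hj1 hij
    by_cases hcmp : idxB p.1 i < idxB p.1 j
    · simp only [if_pos hcmp, if_neg (show ¬ idxB p.1 j < idxB p.1 i by omega)]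
      ring
    · simp only [if_neg hcmp, if_pos (show idxB p.1 j < idxB p.1 i by omega)]
      ring
  rw [List.map_congr_left hpt, sum_map_sub]
  rfl

lemma cope_full {c : Int} {pop : List (List Int × Int)} (hc : 1 ≤ c)
    (hpop : ∀ p ∈ pop, (p.1.take c.toNat).Perm (PySem.List.pyRange 0 c 1)) :
    getCopelandScores (buildPrecedenceTable c pop) c
      = (PySem.List.pyRange 0 c 1).map (fun i =>
          (((PySem.List.pyRange 0 c 1).filter (fun j => j != i)).map
            (fun j => if netB pop i j > 0 then (1 : Int) else -1)).sum) := by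
  obtain ⟨_, hread⟩ := table_read hpop
  rw [cope_eq hc]
  apply List.map_congr_left
  intro i hi
  rw [PySem.List.mem_pyRange_one] at hi
  unfold deltaT
  rw [← sum_map_ite_filter]
  apply congrArg
  apply List.map_congr_left
  intro j hj
  rw [PySem.List.mem_pyRange_one] at hj
  by_cases hij : i = j
  · have h1 : ¬ ((j != i) = true) := by simp [hij]
    rw [if_pos hij, if_neg h1]
  · have h2 : (j != i) = true := by simp [Ne.symm hij]
    have hW : netB pop i j = Wsum pop i j - Wsum pop j i :=
      netB_eq hpop (by omega) (by omega) (by omega) (by omega) hij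
    rw [if_neg hij, if_pos h2,
      hread i j (by omega) (by omega) (by omega) (by omega) hij,
      hread j i (by omega) (by omega) (by omega) (by omega) (Ne.symm hij)]
    by_cases hgt : Wsum pop i j > Wsum pop j i
    · rw [if_pos hgt, if_pos (show netB pop i j > 0 by omega)]
    · rw [if_neg hgt, if_neg (show ¬ netB pop i j > 0 by omega)]

-- the ballot condition of Pre_ is exactly "prefix is a permutation of 0..c-1"
lemma pre_perm {c : Int} {o : List Int} (hlen : c ≤ (o.length : Int))
    (hnd : (o.take c.toNat).Nodup) (hmem : ∀ x ∈ o.take c.toNat, 0 ≤ x ∧ x < c) :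
    (o.take c.toNat).Perm (PySem.List.pyRange 0 c 1) := by
  have hsub : o.take c.toNat ⊆ PySem.List.pyRange 0 c 1 := fun x hx =>
    PySem.List.mem_pyRange_one.mpr (hmem x hx)
  refine (hnd.subperm hsub).perm_of_length_le ?_
  rw [PySem.List.length_pyRange_one]
  simp [List.length_take]
  omega

lemma foldl_const {α β : Type} (l : List α) (init : β) :
    l.foldl (fun s _ => s) init = init := by
  induction l generalizing init with
  | nil => rfl
  | cons x xs ih => exact ih init

-- with a single candidate neither program ever reads a ballot
lemma fullCondorcet_one (pop : List (List Int × Int)) :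
    fullCondorcet 1 pop = fullCondorcet_alt 1 pop := by
  have h0 : PySem.List.pyRange 0 (1-1) 1 = [] := by decide
  have hb : buildPrecedenceTable 1 pop = [[0]] := by
    unfold buildPrecedenceTable
    simp only [h0, List.foldl_nil]
    rw [foldl_const]
    decide
  have hf : PySem.List.pyRange 0 (1:Int) 1 = [0] := by decide
  have hfil : List.filter (fun j => j != (0:Int)) [0] = [] := by decide
  simp only [fullCondorcet, fullCondorcet_alt, hb, hf, hfil, List.map_cons, List.map_nil]
  decide

-- ===== VERDICT (by name: the statement is the Claim_ definition above) =====
theorem fullCondorcet_spec : Claim_equal_fullCondorcet := by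
  intro c pop _ hpre
  obtain ⟨hc, hrest⟩ := hpre
  unfold Spec_fullCondorcet
  rcases hrest with hc1 | hball
  · rw [hc1]
    exact (fullCondorcet_one pop).symm
  · have hperm : ∀ p ∈ pop, (p.1.take c.toNat).Perm (PySem.List.pyRange 0 c 1) := by
      intro p hp
      obtain ⟨h1, h2, h3⟩ := hball p hp
      exact pre_perm h1 h2 h3
    simp only [fullCondorcet, fullCondorcet_alt]
    rw [cope_full hc hperm]
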